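-- pv_equiv track=rewrite | github.com/lucamarien/rawtherapee-mcp-server | src/rawtherapee_mcp/server.py | _pp3_text_set_resize
-- ===== SOURCE A (Python) =====
-- def _pp3_text_set_resize(pp3_text: str, resize_settings: dict[str, str]) -> str:
--     """Replace or append [Resize] section in raw PP3 text.
--
--     Overwrites any existing [Resize] section with the given key-value pairs.
--     If no [Resize] section exists, appends one at the end.
--     """
--     lines = pp3_text.splitlines()
--     out: list[str] = []
--     in_resize = False
--     resize_written = False
--
--     for line in lines:
--         stripped = line.strip()
--         if stripped == "[Resize]":
--             in_resize = True
--             # Write our replacement section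
--             out.append("[Resize]")
--             for key, value in resize_settings.items():
--                 out.append(f"{key}={value}")
--             resize_written = True
--             continue
--         if in_resize:
--             # Skip old resize lines until the next section header
--             if stripped.startswith("[") and stripped.endswith("]"):
--                 in_resize = False
--                 out.append(line)
--             continue
--         out.append(line)
--
--     if not resize_written:
--         out.append("")
--         out.append("[Resize]")
--         for key, value in resize_settings.items():
--             out.append(f"{key}={value}")
--
--     return "\n".join(out)
-- ===== SOURCE B (Python) =====
-- def _pp3_text_set_resize(pp3_text: str, resize_settings: dict[str, str]) -> str:
--     """Replace or append [Resize] section in raw PP3 text (section-decomposition rewrite)."""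
--     lines = pp3_text.splitlines()
--
--     def is_header(line: str) -> bool:
--         s = line.strip()
--         return s.startswith("[") and s.endswith("]")
--
--     # split into preamble (lines before the first header) and a list of sections
--     i = 0
--     while i < len(lines) and not is_header(lines[i]):
--         i += 1
--     preamble = lines[:i]
--     sections = []
--     while i < len(lines):
--         j = i + 1
--         while j < len(lines) and not is_header(lines[j]):
--             j += 1
--         sections.append((lines[i], lines[i + 1:j]))
--         i = j
--
--     kv = [f"{k}={v}" for k, v in resize_settings.items()]
--     body: list[str] = []
--     for header, sec in sections:
--         if header.strip() == "[Resize]":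
--             body += ["[Resize]"] + kv
--         else:
--             body += [header] + sec
--     if not any(h.strip() == "[Resize]" for h, _ in sections):
--         body += ["", "[Resize]"] + kv
--     return "\n".join(preamble + body)
-- ===== Notes on version B (the rewrite author's own statement) =====
-- stated objective: alternative
-- what changed: B replaces A's line-by-line state machine (in_resize/resize_written flags) by a structural decomposition: split the text into a preamble and a list of (header, body) sections, then re-emit sections, substituting the key=value block for every [Resize] section and appending one if none exists.
import Mathlib
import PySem

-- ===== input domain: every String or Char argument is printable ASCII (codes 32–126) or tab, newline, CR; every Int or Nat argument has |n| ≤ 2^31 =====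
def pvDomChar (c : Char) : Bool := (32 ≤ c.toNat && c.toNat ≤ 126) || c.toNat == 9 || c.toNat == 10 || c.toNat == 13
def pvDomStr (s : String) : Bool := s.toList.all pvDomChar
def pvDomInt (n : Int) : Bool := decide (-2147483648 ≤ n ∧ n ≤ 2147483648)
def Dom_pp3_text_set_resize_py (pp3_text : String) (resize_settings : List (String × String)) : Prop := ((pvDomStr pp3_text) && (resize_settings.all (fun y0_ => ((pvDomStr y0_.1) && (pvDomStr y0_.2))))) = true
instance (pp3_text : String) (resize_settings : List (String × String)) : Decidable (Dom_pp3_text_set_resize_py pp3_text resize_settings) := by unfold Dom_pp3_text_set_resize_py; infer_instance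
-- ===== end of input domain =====

-- One-line summary: B rebuilds the text from a preamble + explicit (header, body) section list
-- instead of A's in_resize/resize_written state machine; alternative decomposition, same cost.

-- ===== PORT A =====
-- loop body of A's single for-loop, state = (out, in_resize, resize_written)
def pvAStep (rs : List (String × String)) (s : List String × Bool × Bool) (line : String) : List String × Bool × Bool :=
  let stripped := PySem.Str.strip line
  if stripped == "[Resize]" then
    (s.1 ++ ["[Resize]"] ++ rs.map (fun p => p.1 ++ "=" ++ p.2), true, true)
  else if s.2.1 then
    if PySem.Str.startswith stripped "[" && PySem.Str.endswith stripped "]" then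
      (s.1 ++ [line], false, s.2.2)
    else s
  else (s.1 ++ [line], s.2.1, s.2.2)

def pp3_text_set_resize_py (pp3_text : String) (resize_settings : List (String × String)) : String :=
  let lines := PySem.Str.splitlines pp3_text
  let st := lines.foldl (pvAStep resize_settings) ([], false, false)
  let out := if st.2.2 then st.1
             else st.1 ++ [""] ++ ["[Resize]"] ++ resize_settings.map (fun p => p.1 ++ "=" ++ p.2)
  PySem.Str.join "\n" out

-- ===== PORT B =====
def pvIsHeader (line : String) : Bool :=
  let s := PySem.Str.strip line
  PySem.Str.startswith s "[" && PySem.Str.endswith s "]"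

-- split off the maximal prefix of non-header lines
def pvBreak : List String → List String × List String
  | [] => ([], [])
  | l :: ls =>
    if pvIsHeader l then ([], l :: ls)
    else
      let pr := pvBreak ls
      (l :: pr.1, pr.2)

theorem pvBreak_snd_len : ∀ ls : List String, (pvBreak ls).2.length ≤ ls.length := by
  intro ls
  induction ls with
  | nil => simp [pvBreak]
  | cons l ls ih =>
    simp only [pvBreak]
    split
    · simp
    · simpa using Nat.le_succ_of_le ih

-- group the remaining lines into (header, body) sections
def pvSecs : List String → List (String × List String)
  | [] => []
  | h :: ls =>
    let pr := pvBreak ls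
    (h, pr.1) :: pvSecs pr.2
termination_by ls => ls.length
decreasing_by
  exact Nat.lt_succ_of_le (pvBreak_snd_len ls)

def pp3_text_set_resize_py_alt (pp3_text : String) (resize_settings : List (String × String)) : String :=
  let lines := PySem.Str.splitlines pp3_text
  let pr := pvBreak lines
  let ss := pvSecs pr.2
  let kv := resize_settings.map (fun p => p.1 ++ "=" ++ p.2)
  let body := ss.foldl
    (fun acc s =>
      if PySem.Str.strip s.1 == "[Resize]" then acc ++ ["[Resize]"] ++ kv
      else acc ++ [s.1] ++ s.2) []
  let body2 := if ss.any (fun s => PySem.Str.strip s.1 == "[Resize]") then body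
               else body ++ [""] ++ ["[Resize]"] ++ kv
  PySem.Str.join "\n" (pr.1 ++ body2)

-- ===== PRECONDITION & SPEC =====
def Spec_pp3_text_set_resize_py (pp3_text : String) (resize_settings : List (String × String)) (out : String) : Prop := out = pp3_text_set_resize_py_alt pp3_text resize_settings
instance (pp3_text : String) (resize_settings : List (String × String)) (out : String) : Decidable (Spec_pp3_text_set_resize_py pp3_text resize_settings out) := by unfold Spec_pp3_text_set_resize_py; infer_instance

-- ===== CLAIM (what is proved, stated in full; the proofs are below) =====
def Claim_equal_pp3_text_set_resize_py : Prop := ∀ (pp3_text : String) (resize_settings : List (String × String)), Dom_pp3_text_set_resize_py pp3_text resize_settings → Spec_pp3_text_set_resize_py pp3_text resize_settings (pp3_text_set_resize_py pp3_text resize_settings)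

-- ===== LEMMAS AND PROOFS =====

def pvKV (rs : List (String × String)) : List String := rs.map (fun p => p.1 ++ "=" ++ p.2)

-- rendering of the section list, as plain recursion
def pvRender (kv : List String) : List (String × List String) → List String
  | [] => []
  | s :: ss =>
    (if PySem.Str.strip s.1 == "[Resize]" then ["[Resize]"] ++ kv else [s.1] ++ s.2) ++ pvRender kv ss

theorem pvRender_foldl (kv : List String) : ∀ (ss : List (String × List String)) (acc : List String),
    ss.foldl (fun acc s =>
      if PySem.Str.strip s.1 == "[Resize]" then acc ++ ["[Resize]"] ++ kv
      else acc ++ [s.1] ++ s.2) acc = acc ++ pvRender kv ss := by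
  intro ss
  induction ss with
  | nil => intro acc; simp [pvRender]
  | cons s ss ih =>
    intro acc
    simp only [List.foldl_cons, pvRender]
    rw [ih]
    split <;> simp [List.append_assoc]

theorem pvStrip_resize_header (l : String) (h : (PySem.Str.strip l == "[Resize]") = true) :
    pvIsHeader l = true := by
  rw [beq_iff_eq] at h
  simp only [pvIsHeader, h]
  decide

theorem pvBreak_eq_append : ∀ ls : List String, (pvBreak ls).1 ++ (pvBreak ls).2 = ls := by
  intro ls
  induction ls with
  | nil => simp [pvBreak]
  | cons l ls ih =>
    simp only [pvBreak]
    split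
    · simp
    · simpa using ih

theorem pvBreak_fst_nonheader : ∀ (ls : List String) (l : String), l ∈ (pvBreak ls).1 → pvIsHeader l = false := by
  intro ls
  induction ls with
  | nil => simp [pvBreak]
  | cons x ls ih =>
    intro l hl
    simp only [pvBreak] at hl
    split at hl
    · simp at hl
    · rename_i hx
      simp only [List.mem_cons] at hl
      rcases hl with rfl | hl
      · exact Bool.not_eq_true _ ▸ (by simpa using hx)
      · exact ih l hl

theorem pvBreak_snd_header : ∀ (ls : List String) (h : String) (rest : List String),
    (pvBreak ls).2 = h :: rest → pvIsHeader h = true := by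
  intro ls
  induction ls with
  | nil => intro h rest hx; simp [pvBreak] at hx
  | cons x ls ih =>
    intro h rest hx
    simp only [pvBreak] at hx
    split at hx
    · rename_i hdr
      obtain ⟨rfl, rfl⟩ := by simpa using hx
      exact hdr
    · exact ih h rest (by simpa using hx)

theorem pvBreak_header_head (h : String) (ls : List String) (hh : pvIsHeader h = true) :
    pvBreak (h :: ls) = ([], h :: ls) := by
  simp [pvBreak, hh]

-- A's loop passes over non-header lines: emitted verbatim when in_resize = false
theorem pvSkipFalse (rs : List (String × String)) : ∀ (p r out : List String) (w : Bool),
    (∀ l ∈ p, pvIsHeader l = false) →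
    (p ++ r).foldl (pvAStep rs) (out, false, w) = r.foldl (pvAStep rs) (out ++ p, false, w) := by
  intro p
  induction p with
  | nil => intro r out w _; simp
  | cons l p ih =>
    intro r out w hp
    have hl : pvIsHeader l = false := hp l (by simp)
    have hres : (PySem.Str.strip l == "[Resize]") = false := by
      cases hc : (PySem.Str.strip l == "[Resize]") with
      | false => rfl
      | true => exact absurd (pvStrip_resize_header l hc) (by simp [hl])
    simp only [List.cons_append, List.foldl_cons]
    rw [show pvAStep rs (out, false, w) l = (out ++ [l], false, w) from by simp [pvAStep, hres]]
    have := ih r (out ++ [l]) w (fun x hx => hp x (by simp [hx]))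
    simpa [List.append_assoc] using this

-- …and skips them when in_resize = true
theorem pvSkipTrue (rs : List (String × String)) : ∀ (p r out : List String) (w : Bool),
    (∀ l ∈ p, pvIsHeader l = false) →
    (p ++ r).foldl (pvAStep rs) (out, true, w) = r.foldl (pvAStep rs) (out, true, w) := by
  intro p
  induction p with
  | nil => intro r out w _; simp
  | cons l p ih =>
    intro r out w hp
    have hl : pvIsHeader l = false := hp l (by simp)
    have hres : (PySem.Str.strip l == "[Resize]") = false := by
      cases hc : (PySem.Str.strip l == "[Resize]") with
      | false => rfl
      | true => exact absurd (pvStrip_resize_header l hc) (by simp [hl])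
    have hl' : (PySem.Str.startswith (PySem.Str.strip l) "[" && PySem.Str.endswith (PySem.Str.strip l) "]") = false := by
      simpa [pvIsHeader] using hl
    simp only [List.cons_append, List.foldl_cons]
    rw [show pvAStep rs (out, true, w) l = (out, true, w) from by simp [pvAStep, hres]; simpa using hl']
    exact ih r out w (fun x hx => hp x (by simp [hx]))

-- on a header line, A's step is the same regardless of in_resize
theorem pvStepHeader (rs : List (String × String)) (h : String) (hh : pvIsHeader h = true)
    (out : List String) (b w : Bool) :
    pvAStep rs (out, b, w) h =
      if PySem.Str.strip h == "[Resize]" then (out ++ ["[Resize]"] ++ pvKV rs, true, true)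
      else (out ++ [h], false, w) := by
  have hh' : (PySem.Str.startswith (PySem.Str.strip h) "[" && PySem.Str.endswith (PySem.Str.strip h) "]") = true := by
    simpa [pvIsHeader] using hh
  simp only [pvAStep, pvKV, hh']
  cases hb : (PySem.Str.strip h == "[Resize]") <;> cases b <;> simp

-- main invariant: A's loop from the initial (false) state produces preamble ++ rendered sections,
-- and resize_written records whether some section header strips to "[Resize]"
theorem pvMain (rs : List (String × String)) : ∀ (n : ℕ) (ls : List String), ls.length ≤ n → ∀ (out : List String) (w : Bool),
    (ls.foldl (pvAStep rs) (out, false, w)).1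
        = out ++ (pvBreak ls).1 ++ pvRender (pvKV rs) (pvSecs (pvBreak ls).2)
    ∧ (ls.foldl (pvAStep rs) (out, false, w)).2.2
        = (w || (pvSecs (pvBreak ls).2).any (fun s => PySem.Str.strip s.1 == "[Resize]")) := by
  intro n
  induction n with
  | zero =>
    intro ls hlen out w
    have : ls = [] := List.length_eq_zero_iff.mp (Nat.le_zero.mp hlen)
    subst this
    simp [pvBreak, pvSecs, pvRender]
  | succ n ih =>
    intro ls hlen out w
    have hsplit := pvBreak_eq_append ls
    have hfold : ls.foldl (pvAStep rs) (out, false, w)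
        = (pvBreak ls).2.foldl (pvAStep rs) (out ++ (pvBreak ls).1, false, w) := by
      conv_lhs => rw [← hsplit]
      exact pvSkipFalse rs _ _ out w (pvBreak_fst_nonheader ls)
    rw [hfold]
    have hlen1 : (pvBreak ls).1.length + (pvBreak ls).2.length = ls.length := by
      conv_rhs => rw [← hsplit]
      simp
    cases hr : (pvBreak ls).2 with
    | nil => simp [pvSecs, pvRender]
    | cons h rest =>
      have hh : pvIsHeader h = true := pvBreak_snd_header ls h rest hr
      have hrestlen : rest.length ≤ n := by
        have := hlen1; rw [hr] at this; simp at this; omega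
      simp only [List.foldl_cons, pvStepHeader rs h hh]
      have hsecs : pvSecs (h :: rest) = (h, (pvBreak rest).1) :: pvSecs (pvBreak rest).2 := by
        simp [pvSecs]
      cases hb : (PySem.Str.strip h == "[Resize]") with
      | false =>
        simp only [Bool.false_eq_true, if_false]
        have := ih rest hrestlen (out ++ (pvBreak ls).1 ++ [h]) w
        rw [hsecs]
        simp only [pvRender, hb, Bool.false_eq_true, if_false, List.any_cons]
        constructor
        · rw [this.1]; simp [List.append_assoc]
        · rw [this.2]; simp
      | true =>
        simp only [if_true]
        -- skip the body of this resize section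
        have hrest := pvBreak_eq_append rest
        have hskip : rest.foldl (pvAStep rs) (out ++ (pvBreak ls).1 ++ ["[Resize]"] ++ pvKV rs, true, true)
            = (pvBreak rest).2.foldl (pvAStep rs) (out ++ (pvBreak ls).1 ++ ["[Resize]"] ++ pvKV rs, true, true) := by
          conv_lhs => rw [← hrest]
          exact pvSkipTrue rs _ _ _ _ (pvBreak_fst_nonheader rest)
        rw [hskip, hsecs]
        simp only [pvRender, hb, if_true, List.any_cons, Bool.true_or, Bool.or_true]
        cases hr2 : (pvBreak rest).2 with
        | nil => simp [pvSecs, pvRender]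
        | cons h2 rest2 =>
          have hh2 : pvIsHeader h2 = true := pvBreak_snd_header rest h2 rest2 hr2
          have hr2len : (h2 :: rest2).length ≤ n := by
            have := pvBreak_snd_len rest
            rw [hr2] at this
            omega
          have hflip : (h2 :: rest2).foldl (pvAStep rs) (out ++ (pvBreak ls).1 ++ ["[Resize]"] ++ pvKV rs, true, true)
              = (h2 :: rest2).foldl (pvAStep rs) (out ++ (pvBreak ls).1 ++ ["[Resize]"] ++ pvKV rs, false, true) := by
            simp only [List.foldl_cons, pvStepHeader rs h2 hh2]
          rw [hflip]
          have := ih (h2 :: rest2) hr2len (out ++ (pvBreak ls).1 ++ ["[Resize]"] ++ pvKV rs) true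
          have hbr2 : pvBreak (h2 :: rest2) = ([], h2 :: rest2) := pvBreak_header_head h2 rest2 hh2
          rw [hbr2] at this
          constructor
          · rw [this.1]; simp [List.append_assoc]
          · rw [this.2]; simp

-- ===== VERDICT (by name: the statement is the Claim_ definition above) =====
theorem pp3_text_set_resize_py_spec : Claim_equal_pp3_text_set_resize_py := by
  intro pp3_text rs _
  unfold Spec_pp3_text_set_resize_py pp3_text_set_resize_py pp3_text_set_resize_py_alt
  simp only []
  set lines := PySem.Str.splitlines pp3_text with hlines
  have hmain := pvMain rs lines.length lines (le_refl _) [] false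
  rw [pvRender_foldl]
  simp only [List.nil_append] at hmain ⊢
  rw [hmain.1, hmain.2]
  simp only [Bool.false_or]
  cases hany : (pvSecs (pvBreak lines).2).any (fun s => PySem.Str.strip s.1 == "[Resize]") with
  | true => simp [pvKV]
  | false => simp [pvKV, List.append_assoc]
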